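-- pv_equiv track=rewrite | github.com/jclsongco/UnnecessaryTicTacToe | tictactoe.py | verti_check
-- ===== SOURCE A (Python) =====
-- def verti_check(cell_list,number): #number is the number of rows or columns, check for vertica; win conditions
--     positions = []
--     for place in cell_list:
--         positions.append(place[0][0])
--     index = set(positions)
--
--     for num in index:
--         counter = positions.count(num)
--         if counter == number:
--             return True
-- ===== SOURCE B (Python) =====
-- def verti_check(cell_list, number):
--     # Sort the column values, then a single grouped scan over the sorted list:
--     # a run of equal values is one distinct value's full count; check each run
--     # boundary against number.  Replaces A's set-of-uniques + per-value rescan.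
--     positions = sorted(place[0][0] for place in cell_list)
--     if not positions:
--         return None
--     run_val = positions[0]
--     run_len = 1
--     for x in positions[1:]:
--         if x == run_val:
--             run_len += 1
--         else:
--             if run_len == number:
--                 return True
--             run_val, run_len = x, 1
--     if run_len == number:
--         return True
-- ===== Notes on version B (the rewrite author's own statement) =====
-- stated objective: alternative
-- what changed: B sorts the extracted column values and detects equal-count runs in one grouped scan over the sorted list (comparison-based grouping), instead of A's building a set of unique values and rescanning the whole positions list with .count() for each one.
import Mathlib
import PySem

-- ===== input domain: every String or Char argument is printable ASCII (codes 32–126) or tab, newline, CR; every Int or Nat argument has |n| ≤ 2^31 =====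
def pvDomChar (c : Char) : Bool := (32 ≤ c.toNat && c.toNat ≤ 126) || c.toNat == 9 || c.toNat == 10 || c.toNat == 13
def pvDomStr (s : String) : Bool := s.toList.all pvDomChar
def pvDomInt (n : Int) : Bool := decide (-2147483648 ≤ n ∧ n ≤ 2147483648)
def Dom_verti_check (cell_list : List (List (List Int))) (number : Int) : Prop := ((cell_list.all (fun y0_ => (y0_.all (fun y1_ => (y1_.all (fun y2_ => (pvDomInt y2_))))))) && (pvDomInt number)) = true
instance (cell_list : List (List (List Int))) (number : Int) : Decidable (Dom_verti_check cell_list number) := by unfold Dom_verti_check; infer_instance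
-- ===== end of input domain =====

-- B sorts the column values and finds an exact-count value by one grouped run-length
-- scan over the sorted list, instead of A's set of uniques + per-value list rescan.

-- place[0][0], total form; exact under Pre_ (place and place[0] nonempty)
def vcCell (place : List (List Int)) : Int :=
  PySem.List.pyGetD (PySem.List.pyGetD place 0 []) 0 0

-- ===== PORT A =====
-- 'for num in index: counter = positions.count(num); if counter == number: return True'
def vcScanA (positions : List Int) (number : Int) : List Int → Option Bool
  | [] => none
  | num :: rest =>
      let counter : Int := (PySem.List.count positions num : Int)
      if counter = number then some true else vcScanA positions number rest

def verti_check (cell_list : List (List (List Int))) (number : Int) : Option Bool :=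
  let positions := cell_list.foldl (fun acc place => acc ++ [vcCell place]) []
  let index := PySem.Set.ofList positions
  vcScanA positions number index

-- ===== PORT B =====
-- the 'for x in positions[1:]' loop plus the trailing 'if run_len == number' check;
-- state = (run_val, run_len)
def vcGroup (number : Int) (v : Int) (run : Int) : List Int → Option Bool
  | [] => if run = number then some true else none
  | x :: rest =>
      if x = v then vcGroup number v (run + 1) rest
      else if run = number then some true
      else vcGroup number x 1 rest

def verti_check_alt (cell_list : List (List (List Int))) (number : Int) : Option Bool :=
  match PySem.List.sorted (cell_list.map vcCell) (fun x => x) false with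
  | [] => none
  | v :: rest => vcGroup number v 1 rest

-- ===== PRECONDITION & SPEC =====
-- Pre_ excludes exactly the inputs where the Python A raises IndexError: some
-- place with place == [] or place[0] == [] (B raises there too).
def Pre_verti_check (cell_list : List (List (List Int))) (number : Int) : Prop :=
  ∀ place ∈ cell_list, place ≠ [] ∧ place.headI ≠ []
instance (cell_list : List (List (List Int))) (number : Int) : Decidable (Pre_verti_check cell_list number) := by unfold Pre_verti_check; infer_instance

def pvWitness_verti_check : List (List (List Int)) × Int := ([[[1]], [[2]], [[1]]], 2)

def Spec_verti_check (cell_list : List (List (List Int))) (number : Int) (out : Option Bool) : Prop := out = verti_check_alt cell_list number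
instance (cell_list : List (List (List Int))) (number : Int) (out : Option Bool) : Decidable (Spec_verti_check cell_list number out) := by unfold Spec_verti_check; infer_instance

-- ===== CLAIM =====
def Claim_equal_verti_check : Prop := ∀ (cell_list : List (List (List Int))) (number : Int), Dom_verti_check cell_list number → Pre_verti_check cell_list number → Spec_verti_check cell_list number (verti_check cell_list number)

-- ===== LEMMAS AND PROOFS =====

theorem vcScanA_eq (positions : List Int) (number : Int) (l : List Int) :
    vcScanA positions number l =
      if l.any (fun num => (PySem.List.count positions num : Int) == number)
      then some true else none := by
  induction l with
  | nil => rfl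
  | cons x rest ih =>
      simp only [vcScanA, ih, List.any_cons]
      by_cases hx : (PySem.List.count positions x : Int) = number <;> simp_all

-- run-length scan on a sorted tail, all elements ≥ v: finds an exact count
theorem vcGroup_eq (number : Int) : ∀ (l : List Int) (v run : Int),
    l.Pairwise (· ≤ ·) → (∀ x ∈ l, v ≤ x) →
    vcGroup number v run l =
      if run + (l.count v : Int) = number ∨
         ∃ x ∈ l, x ≠ v ∧ (l.count x : Int) = number
      then some true else none := by
  intro l
  induction l with
  | nil => intro v run _ _; simp [vcGroup]
  | cons x rest ih =>
      intro v run hpw hge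
      have hx_le : ∀ y ∈ rest, x ≤ y := (List.pairwise_cons.mp hpw).1
      have hrest_pw := (List.pairwise_cons.mp hpw).2
      by_cases hxv : x = v
      · subst hxv
        rw [vcGroup, if_pos rfl, ih x (run + 1) hrest_pw hx_le]
        refine if_congr ?_ rfl rfl
        constructor
        · rintro (h | ⟨y, hy, hyx, hc⟩)
          · left; rw [List.count_cons_self]; push_cast; push_cast at h; omega
          · exact Or.inr ⟨y, List.mem_cons_of_mem _ hy, hyx,
              by rwa [List.count_cons_of_ne (Ne.symm hyx)]⟩
        · rintro (h | ⟨y, hy, hyx, hc⟩)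
          · left; rw [List.count_cons_self] at h; push_cast at h ⊢; omega
          · rcases List.mem_cons.mp hy with rfl | hy'
            · exact absurd rfl hyx
            · exact Or.inr ⟨y, hy', hyx, by rwa [List.count_cons_of_ne (Ne.symm hyx)] at hc⟩
      · -- x ≠ v, so v < x ≤ everything: v does not occur in x :: rest
        have hvx : v < x :=
          lt_of_le_of_ne (hge x List.mem_cons_self) (fun h => hxv h.symm)
        have hvnot : v ∉ x :: rest := by
          intro hmem
          rcases List.mem_cons.mp hmem with h | h
          · exact hxv h.symm
          · exact absurd (hx_le v h) (by omega)
        have hcv : (x :: rest).count v = 0 := List.count_eq_zero.mpr hvnot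
        rw [vcGroup, if_neg hxv]
        by_cases hrun : run = number
        · rw [if_pos hrun, if_pos]
          left; rw [hcv]; omega
        · rw [if_neg hrun, ih x 1 hrest_pw hx_le]
          refine if_congr ?_ rfl rfl
          rw [hcv]
          constructor
          · rintro (h | ⟨y, hy, hyx, hc⟩)
            · refine Or.inr ⟨x, List.mem_cons_self, fun hh => hxv hh, ?_⟩
              rw [List.count_cons_self]; push_cast; push_cast at h; omega
            · have hyv : y ≠ v := by
                have := hx_le y hy; omega
              refine Or.inr ⟨y, List.mem_cons_of_mem _ hy, hyv, ?_⟩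
              by_cases hyx2 : y = x
              · exact absurd hyx2 hyx
              · rwa [List.count_cons_of_ne (Ne.symm hyx2)]
          · rintro (h | ⟨y, hy, hyv, hc⟩)
            · push_cast at h; omega
            · rcases List.mem_cons.mp hy with rfl | hy'
              · left; rw [List.count_cons_self] at hc; push_cast at hc ⊢; omega
              · by_cases hyx2 : y = x
                · subst hyx2
                  left; rw [List.count_cons_self] at hc; push_cast at hc ⊢; omega
                · exact Or.inr ⟨y, hy', hyx2, by rwa [List.count_cons_of_ne (Ne.symm hyx2)] at hc⟩

-- both sides reduce to: some value of pos has count = number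
theorem verti_check_alt_eq (cell_list : List (List (List Int))) (number : Int) :
    verti_check_alt cell_list number =
      if ∃ x ∈ cell_list.map vcCell,
           ((cell_list.map vcCell).count x : Int) = number
      then some true else none := by
  unfold verti_check_alt
  set pos := cell_list.map vcCell with hpos
  have hperm : (PySem.List.sorted pos (fun x => x) false).Perm pos :=
    PySem.List.sorted_perm pos (fun x => x) false
  have hpw : (PySem.List.sorted pos (fun x => x) false).Pairwise (· ≤ ·) := by
    simpa using PySem.List.sorted_pairwise pos (fun x => x)
  cases hs : PySem.List.sorted pos (fun x => x) false with
  | nil =>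
      have : pos = [] := by
        have := hperm; rw [hs] at this; exact this.nil_eq.symm
      simp [this]
  | cons v rest =>
      rw [hs] at hperm hpw
      have hx_le : ∀ y ∈ rest, v ≤ y := (List.pairwise_cons.mp hpw).1
      have hrest_pw := (List.pairwise_cons.mp hpw).2
      show vcGroup number v 1 rest = _
      rw [vcGroup_eq number rest v 1 hrest_pw hx_le]
      refine if_congr ?_ rfl rfl
      have hcount : ∀ y : Int, pos.count y = (v :: rest).count y :=
        fun y => (hperm.count_eq y).symm
      have hmem : ∀ y : Int, y ∈ pos ↔ y ∈ v :: rest := fun y => hperm.mem_iff.symm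
      constructor
      · rintro (h | ⟨y, hy, hyv, hc⟩)
        · exact ⟨v, (hmem v).mpr List.mem_cons_self,
            by rw [hcount, List.count_cons_self]; push_cast; push_cast at h; omega⟩
        · exact ⟨y, (hmem y).mpr (List.mem_cons_of_mem _ hy),
            by rw [hcount, List.count_cons_of_ne (Ne.symm hyv)]; exact hc⟩
      · rintro ⟨y, hy, hc⟩
        rw [hcount] at hc
        rcases List.mem_cons.mp ((hmem y).mp hy) with rfl | hy'
        · left; rw [List.count_cons_self] at hc; push_cast at hc ⊢; omega
        · by_cases hyv : y = v
          · subst hyv; left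
            rw [List.count_cons_self] at hc; push_cast at hc ⊢; omega
          · exact Or.inr ⟨y, hy', hyv, by rwa [List.count_cons_of_ne (Ne.symm hyv)] at hc⟩

-- ===== VERDICT =====
theorem verti_check_spec : Claim_equal_verti_check := by
  intro cell_list number _ _
  unfold Spec_verti_check verti_check
  rw [PySem.List.foldl_append_singleton_eq_map]
  simp only [List.nil_append]
  set pos := cell_list.map vcCell with hpos
  rw [vcScanA_eq, verti_check_alt_eq]
  refine if_congr ?_ rfl rfl
  simp only [List.any_eq_true, beq_iff_eq]
  constructor
  · rintro ⟨y, hy, hc⟩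
    exact ⟨y, (PySem.Set.mem_ofList _ _).mp hy, by rwa [PySem.List.count_eq] at hc⟩
  · rintro ⟨y, hy, hc⟩
    exact ⟨y, (PySem.Set.mem_ofList _ _).mpr hy, by rwa [PySem.List.count_eq]⟩
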